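-- pv_equiv track=rewrite | github.com/msd7at/LeetCode | 1702. Maximum Binary String After Change.py | maximumBinaryString
-- ===== SOURCE A (Python) =====
-- def maximumBinaryString(binary: str) -> str:
--     c=0
--     st=0
--     for i in range(len(binary)) :
--         if binary[i]=="0":
--             if c==0:
--                 st=i
--             c+=1
--     c=c+st
--     res=""
--     for i in range(len(binary)):
--         if i==c-1:
--             res+="0"
--         else:
--             res+="1"
--     return res
-- ===== SOURCE B (Python) =====
-- def maximumBinaryString(binary: str) -> str:
--     # Simulate the allowed operations on a mutable char array:
--     # every later zero is slid left ("10"->"01") next to the tracked zero and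
--     # merged ("00"->"10"), which pushes the single remaining zero one step right.
--     res = ['0' if ch == '0' else '1' for ch in binary]
--     z = -1  # position of the single remaining zero, -1 = none seen yet
--     for j in range(len(binary)):
--         if binary[j] == '0':
--             if z < 0:
--                 z = j
--             else:
--                 res[j] = '1'   # the new zero moves left next to res[z] ...
--                 res[z] = '1'   # ... and "00" -> "10":
--                 z += 1
--                 res[z] = '0'   # the zero ends up one step to the right
--     return ''.join(res)
-- ===== Notes on version B (the rewrite author's own statement) =====
-- stated objective: alternative
-- what changed: A counts zeros and the first-zero index, then rebuilds the string with a second per-index loop comparing against the computed target position; B never computes a target position: it simulates the allowed operations themselves on a mutable char array, sliding each later zero next to the tracked zero and merging, so the single zero migrates rightward by in-place writes.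
import Mathlib
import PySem

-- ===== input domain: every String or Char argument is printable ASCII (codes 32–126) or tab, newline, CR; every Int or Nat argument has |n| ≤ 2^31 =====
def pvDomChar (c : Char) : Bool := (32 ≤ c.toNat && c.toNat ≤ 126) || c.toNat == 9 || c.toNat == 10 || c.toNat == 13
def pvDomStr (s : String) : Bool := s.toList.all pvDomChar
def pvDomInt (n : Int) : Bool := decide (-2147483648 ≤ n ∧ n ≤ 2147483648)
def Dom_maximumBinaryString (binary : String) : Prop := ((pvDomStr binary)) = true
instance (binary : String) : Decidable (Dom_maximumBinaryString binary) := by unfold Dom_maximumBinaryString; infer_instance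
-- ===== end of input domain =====

-- B simulates the allowed operations on a mutable char array (sliding/merging the tracked zero
-- by in-place writes) instead of A's counting pass plus position-comparing rebuild pass; an
-- alternative algorithm of the same cost.

-- ===== PORT A =====
-- first loop: scans indices, counting '0's (c) and remembering the index of the first '0' (st);
-- second loop: rebuilds the string, '0' exactly at index c + st - 1, '1' everywhere else.
def maximumBinaryString (binary : String) : String :=
  let l := binary.toList
  let p : Int × Int :=
    (PySem.List.pyRange 0 (PySem.Str.len binary) 1).foldl
      (fun (p : Int × Int) i =>
        if PySem.List.pyGetD l i ' ' = '0' then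
          (p.1 + 1, if p.1 = 0 then i else p.2)
        else p)
      (0, 0)
  let c : Int := p.1 + p.2
  let res : List Char :=
    (PySem.List.pyRange 0 (PySem.Str.len binary) 1).foldl
      (fun (r : List Char) i => r ++ [if i = c - 1 then '0' else '1'])
      []
  String.ofList res

-- ===== PORT B =====
-- res = ['0' if ch=='0' else '1' for ch in binary] is the map below; the loop mutates res in
-- place: res[j]=… is PySem.List.pySetD (exact here: every written index is in range, and
-- pySetD agrees with Python list assignment on in-range indices); ''.join → String.ofList.
def maximumBinaryString_alt (binary : String) : String :=
  let l := binary.toList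
  let res0 : List Char := l.map (fun ch => if ch = '0' then '0' else '1')
  let st : List Char × Int :=
    (PySem.List.pyRange 0 (PySem.Str.len binary) 1).foldl
      (fun (st : List Char × Int) j =>
        if PySem.List.pyGetD l j ' ' = '0' then
          if st.2 < 0 then (st.1, j)
          else (PySem.List.pySetD (PySem.List.pySetD (PySem.List.pySetD st.1 j '1') st.2 '1')
                  (st.2 + 1) '0', st.2 + 1)
        else st)
      (res0, -1)
  String.ofList st.1

-- ===== PRECONDITION & SPEC =====
def Spec_maximumBinaryString (binary : String) (out : String) : Prop := out = maximumBinaryString_alt binary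
instance (binary : String) (out : String) : Decidable (Spec_maximumBinaryString binary out) := by unfold Spec_maximumBinaryString; infer_instance

-- ===== CLAIM (what is proved, stated in full; the proofs are below) =====
def Claim_equal_maximumBinaryString : Prop := ∀ (binary : String), Dom_maximumBinaryString binary → Spec_maximumBinaryString binary (maximumBinaryString binary)

-- ===== LEMMAS AND PROOFS =====

-- the normalization B's comprehension applies to each character
def pvNorm (c : Char) : Char := if c = '0' then '0' else '1'

-- the body of A's first loop, as a step function over (index, character) pairs
def pvStep (p : Int × Int) (pr : Int × Char) : Int × Int :=
  if pr.2 = '0' then (p.1 + 1, if p.1 = 0 then pr.1 else p.2) else p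

-- the body of B's loop, as a step function over (index, character) pairs
def pvStepB (st : List Char × Int) (pr : Int × Char) : List Char × Int :=
  if pr.2 = '0' then
    if st.2 < 0 then (st.1, pr.1)
    else (PySem.List.pySetD (PySem.List.pySetD (PySem.List.pySetD st.1 pr.1 '1') st.2 '1')
            (st.2 + 1) '0', st.2 + 1)
  else st

-- once some '0' has been counted (0 < c), st never changes and c accumulates the count
theorem pvLoop1_ne (l : List Char) (s c st : Int) (hc : 0 < c) :
    (PySem.List.enumerate l s).foldl pvStep (c, st) = (c + l.count '0', st) := by
  induction l generalizing s c with
  | nil => simp [PySem.List.enumerate_nil]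
  | cons x t ih =>
    rw [PySem.List.enumerate_cons, List.foldl_cons]
    by_cases hx : x = '0'
    · rw [show pvStep (c, st) (s, x) = (c + 1, st) by simp [pvStep, hx]; intro h; omega,
        ih (s + 1) (c + 1) (by omega)]
      simp [hx]
      ring
    · rw [show pvStep (c, st) (s, x) = (c, st) by simp [pvStep, hx],
        ih (s + 1) c hc]
      simp [hx]

-- A's first loop from a fresh accumulator: the count of '0' and the first '0' index
theorem pvLoop1_zero (l : List Char) (s st : Int) :
    (PySem.List.enumerate l s).foldl pvStep (0, st) =
      if '0' ∈ l then ((l.count '0' : Int), s + l.idxOf '0') else (0, st) := by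
  induction l generalizing s st with
  | nil => simp [PySem.List.enumerate_nil]
  | cons x t ih =>
    rw [PySem.List.enumerate_cons, List.foldl_cons]
    by_cases hx : x = '0'
    · rw [show pvStep (0, st) (s, x) = (1, s) by simp [pvStep, hx],
        pvLoop1_ne t (s + 1) 1 s one_pos]
      simp [hx]
      ring
    · rw [show pvStep (0, st) (s, x) = (0, st) by simp [pvStep, hx], ih (s + 1) st]
      by_cases hm : '0' ∈ t <;>
        simp [hm, hx, Ne.symm hx]
      ring

-- the '0'-at-one-position map over range as the replicate/cons/replicate shape
theorem pvMap_range (n pos : Nat) (h : pos < n) :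
    (List.range n).map (fun k : Nat => if (k : Int) = (pos : Int) then '0' else '1') =
      List.replicate pos '1' ++ '0' :: List.replicate (n - pos - 1) '1' := by
  have hn : n = pos + 1 + (n - pos - 1) := by omega
  conv_lhs => rw [hn, List.range_add, List.range_add]
  simp only [List.map_append, List.map_map, List.range_one, List.map_cons, List.map_nil]
  have hA : (List.range pos).map (fun k : Nat => if (k : Int) = (pos : Int) then '0' else '1')
      = List.replicate pos '1' := by
    rw [List.map_congr_left (g := fun _ => '1') (by intro k hk; simp at hk ⊢; omega)]
    simp [List.map_const']
  have hC : (List.range (n - pos - 1)).map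
      ((fun k : Nat => if (k : Int) = (pos : Int) then '0' else '1') ∘ fun x => pos + 1 + x)
      = List.replicate (n - pos - 1) '1' := by
    rw [List.map_congr_left (g := fun _ => '1') (by intro k hk; simp at hk ⊢; omega)]
    simp [List.map_const']
  rw [hA, hC]
  simp

-- no '0' occurs before the first '0', so the first index plus the count stays in bounds
theorem pvIdx_count_le (l : List Char) (h : '0' ∈ l) :
    l.idxOf '0' + l.count '0' ≤ l.length := by
  induction l with
  | nil => simp at h
  | cons x t ih =>
    by_cases hx : x = '0'
    · simp [hx]
      have := List.count_le_length (l := t) (a := '0')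
      omega
    · have hm : '0' ∈ t := by
        cases h with
        | head => exact absurd rfl hx
        | tail _ h => exact h
      simp [hx]
      have := ih hm
      omega

-- in-place write at the index right after a known prefix
theorem pv_set_at (P B : List Char) (c y : Char) :
    (P ++ c :: B).set P.length y = P ++ y :: B := by
  induction P with
  | nil => simp
  | cons p P ih => simp [ih]

-- the same, with the index given as any expression equal to the prefix length
theorem pv_set_at' (P B : List Char) (c y : Char) (n : Nat) (h : n = P.length) :
    (P ++ c :: B).set n y = P ++ y :: B := by
  rw [h, pv_set_at]

-- absorbing one more '1' into a replicate block
theorem pv_rep_snoc (z : Nat) (X : List Char) :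
    List.replicate z '1' ++ '1' :: X = List.replicate (z + 1) '1' ++ X := by
  simp [List.replicate_succ']

-- B's loop after the first zero has been found: the zero slides right once per later zero
theorem pvB_ne (t : List Char) (s z : Nat) (hz : z < s) :
    (PySem.List.enumerate t (s : Int)).foldl pvStepB
        (List.replicate z '1' ++ '0' :: (List.replicate (s - 1 - z) '1' ++ t.map pvNorm), (z : Int)) =
      (List.replicate (z + t.count '0') '1' ++ '0' ::
        List.replicate (s + t.length - 1 - (z + t.count '0')) '1',
       ((z + t.count '0' : Nat) : Int)) := by
  induction t generalizing s z with
  | nil => simp [PySem.List.enumerate_nil]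
  | cons x t ih =>
    rw [PySem.List.enumerate_cons, List.foldl_cons,
      show ((s : Int) + 1) = ((s + 1 : Nat) : Int) by push_cast; ring]
    by_cases hx : x = '0'
    · subst hx
      rw [show List.map pvNorm ('0' :: t) = '0' :: List.map pvNorm t by simp [pvNorm]]
      have hstep :
          pvStepB (List.replicate z '1' ++ '0' :: (List.replicate (s - 1 - z) '1' ++ '0' :: t.map pvNorm), (z : Int)) (((s : Nat) : Int), '0')
            = (List.replicate (z + 1) '1' ++ '0' :: (List.replicate ((s + 1) - 1 - (z + 1)) '1' ++ t.map pvNorm), ((z + 1 : Nat) : Int)) := by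
        show (if ('0' : Char) = '0' then _ else _) = _
        rw [if_pos rfl]
        show (if (z : Int) < 0 then _ else _) = _
        rw [if_neg (by omega : ¬ ((z : Int) < 0))]
        have h1 : List.replicate z '1' ++ '0' :: (List.replicate (s - 1 - z) '1' ++ '0' :: t.map pvNorm)
            = (List.replicate z '1' ++ '0' :: List.replicate (s - 1 - z) '1') ++ '0' :: t.map pvNorm := by
          simp
        dsimp only
        rw [show ((z : Int) + 1) = ((z + 1 : Nat) : Int) by push_cast; ring]
        simp only [PySem.List.pySetD_natCast]
        rw [h1, pv_set_at' _ _ _ _ s (by simp; omega)]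
        have h2 : (List.replicate z '1' ++ '0' :: List.replicate (s - 1 - z) '1') ++ '1' :: t.map pvNorm
            = List.replicate z '1' ++ '0' :: (List.replicate (s - z) '1' ++ t.map pvNorm) := by
          rw [show s - z = (s - 1 - z) + 1 by omega]
          simp only [List.append_assoc, List.cons_append]
          rw [pv_rep_snoc]
        rw [h2, pv_set_at' _ _ _ _ z (by simp), pv_rep_snoc]
        have h3 : List.replicate (s - z) '1' ++ t.map pvNorm
            = '1' :: (List.replicate (s - 1 - z) '1' ++ t.map pvNorm) := by
          rw [show s - z = (s - 1 - z) + 1 by omega, List.replicate_succ]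
          simp
        rw [h3, pv_set_at' _ _ _ _ (z + 1) (by simp),
          show s + 1 - 1 - (z + 1) = s - 1 - z by omega]
      rw [hstep, ih (s + 1) (z + 1) (by omega)]
      have hc : List.count '0' ('0' :: t) = List.count '0' t + 1 := by simp
      have hL : ('0' :: t).length = t.length + 1 := rfl
      rw [hc, hL,
        show z + 1 + List.count '0' t = z + (List.count '0' t + 1) by omega,
        show s + 1 + t.length - 1 - (z + (List.count '0' t + 1))
          = s + (t.length + 1) - 1 - (z + (List.count '0' t + 1)) by omega]
    · rw [show List.map pvNorm (x :: t) = '1' :: List.map pvNorm t by simp [pvNorm, hx]]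
      have hstep :
          pvStepB (List.replicate z '1' ++ '0' :: (List.replicate (s - 1 - z) '1' ++ '1' :: t.map pvNorm), (z : Int)) (((s : Nat) : Int), x)
            = (List.replicate z '1' ++ '0' :: (List.replicate ((s + 1) - 1 - z) '1' ++ t.map pvNorm), (z : Int)) := by
        show (if x = '0' then _ else _) = _
        rw [if_neg hx]
        have h3 : List.replicate (s - 1 - z) '1' ++ '1' :: t.map pvNorm
            = List.replicate ((s + 1) - 1 - z) '1' ++ t.map pvNorm := by
          rw [pv_rep_snoc]
          congr 2
          omega
        rw [h3]
      rw [hstep, ih (s + 1) z (by omega)]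
      have hc : List.count '0' (x :: t) = List.count '0' t := by simp [hx]
      have hL : (x :: t).length = t.length + 1 := rfl
      rw [hc, hL,
        show s + 1 + t.length - 1 - (z + List.count '0' t)
          = s + (t.length + 1) - 1 - (z + List.count '0' t) by omega]

-- B's loop from the fresh accumulator (no zero seen yet)
theorem pvB_neg (t : List Char) (s : Nat) :
    (PySem.List.enumerate t (s : Int)).foldl pvStepB
        (List.replicate s '1' ++ t.map pvNorm, -1) =
      if '0' ∈ t then
        (List.replicate (s + t.idxOf '0' + (t.count '0' - 1)) '1' ++ '0' ::
          List.replicate (t.length - t.idxOf '0' - t.count '0') '1',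
         ((s + t.idxOf '0' + (t.count '0' - 1) : Nat) : Int))
      else (List.replicate (s + t.length) '1', -1) := by
  induction t generalizing s with
  | nil => simp [PySem.List.enumerate_nil]
  | cons x t ih =>
    rw [PySem.List.enumerate_cons, List.foldl_cons,
      show ((s : Int) + 1) = ((s + 1 : Nat) : Int) by push_cast; ring]
    by_cases hx : x = '0'
    · subst hx
      rw [show List.map pvNorm ('0' :: t) = '0' :: List.map pvNorm t by simp [pvNorm]]
      have hstep :
          pvStepB (List.replicate s '1' ++ '0' :: t.map pvNorm, -1) (((s : Nat) : Int), '0')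
            = (List.replicate s '1' ++ '0' :: (List.replicate ((s + 1) - 1 - s) '1' ++ t.map pvNorm), (s : Int)) := by
        show (if ('0' : Char) = '0' then _ else _) = _
        rw [if_pos rfl]
        show (if (-1 : Int) < 0 then _ else _) = _
        rw [if_pos (by omega)]
        simp
      rw [hstep, pvB_ne t (s + 1) s (by omega)]
      have hcl := List.count_le_length (l := t) (a := '0')
      rw [if_pos (by simp : '0' ∈ '0' :: t)]
      have hi : List.idxOf '0' ('0' :: t) = 0 := by simp
      have hc : List.count '0' ('0' :: t) = List.count '0' t + 1 := by simp
      have hL : ('0' :: t).length = t.length + 1 := rfl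
      rw [hi, hc, hL,
        show s + List.count '0' t = s + 0 + (List.count '0' t + 1 - 1) by omega,
        show s + 1 + t.length - 1 - (s + 0 + (List.count '0' t + 1 - 1))
          = t.length + 1 - 0 - (List.count '0' t + 1) by omega]
    · rw [show List.map pvNorm (x :: t) = '1' :: List.map pvNorm t by simp [pvNorm, hx]]
      have hstep :
          pvStepB (List.replicate s '1' ++ '1' :: t.map pvNorm, -1) (((s : Nat) : Int), x)
            = (List.replicate (s + 1) '1' ++ t.map pvNorm, -1) := by
        show (if x = '0' then _ else _) = _
        rw [if_neg hx, pv_rep_snoc]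
      rw [hstep, ih (s + 1)]
      have hi : List.idxOf '0' (x :: t) = List.idxOf '0' t + 1 := by
        simp [hx]
      have hc : List.count '0' (x :: t) = List.count '0' t := by simp [hx]
      have hL : (x :: t).length = t.length + 1 := rfl
      by_cases hm : '0' ∈ t
      · rw [if_pos hm, if_pos (by simp [hm] : '0' ∈ x :: t), hi, hc, hL,
          show s + 1 + List.idxOf '0' t = s + (List.idxOf '0' t + 1) by omega,
          show t.length - List.idxOf '0' t - List.count '0' t
            = t.length + 1 - (List.idxOf '0' t + 1) - List.count '0' t by omega]
      · rw [if_neg hm,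
          if_neg (by
            intro h
            rcases List.mem_cons.mp h with h | h
            · exact hx h.symm
            · exact hm h : ¬ ('0' ∈ x :: t)), hL,
          show s + 1 + t.length = s + (t.length + 1) by omega]

-- ===== VERDICT (by name: the statement is the Claim_ definition above) =====
theorem maximumBinaryString_spec : Claim_equal_maximumBinaryString := by
  intro binary _
  unfold Spec_maximumBinaryString
  set l := binary.toList with hl
  -- A's first loop as a fold of pvStep over enumerate
  have h1 : (PySem.List.pyRange 0 (PySem.Str.len binary) 1).foldl
      (fun (p : Int × Int) i =>
        if PySem.List.pyGetD l i ' ' = '0' then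
          (p.1 + 1, if p.1 = 0 then i else p.2)
        else p) (0, 0)
      = (PySem.List.enumerate l 0).foldl pvStep (0, 0) := by
    rw [show PySem.Str.len binary = PySem.List.len l by simp [PySem.Str.len_eq, PySem.List.len_eq, hl],
      PySem.List.enumerate_eq_map_pyRange (d := ' '), List.foldl_map]
    rfl
  -- B's loop as a fold of pvStepB over enumerate
  have h2 : (PySem.List.pyRange 0 (PySem.Str.len binary) 1).foldl
      (fun (st : List Char × Int) j =>
        if PySem.List.pyGetD l j ' ' = '0' then
          if st.2 < 0 then (st.1, j)
          else (PySem.List.pySetD (PySem.List.pySetD (PySem.List.pySetD st.1 j '1') st.2 '1')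
                  (st.2 + 1) '0', st.2 + 1)
        else st) (l.map (fun ch => if ch = '0' then '0' else '1'), -1)
      = (PySem.List.enumerate l 0).foldl pvStepB (l.map pvNorm, -1) := by
    rw [show PySem.Str.len binary = PySem.List.len l by simp [PySem.Str.len_eq, PySem.List.len_eq, hl],
      PySem.List.enumerate_eq_map_pyRange (d := ' '), List.foldl_map]
    rfl
  -- A's second loop as a map over range
  have hA : ∀ c : Int,
      (PySem.List.pyRange 0 (PySem.Str.len binary) 1).foldl
        (fun (r : List Char) i => r ++ [if i = c - 1 then '0' else '1']) []
      = (List.range l.length).map (fun k : Nat => if (k : Int) = c - 1 then '0' else '1') := by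
    intro c
    rw [show PySem.Str.len binary = (l.length : Int) by simp [PySem.Str.len_eq, hl],
      PySem.List.foldl_append_singleton_eq_map, PySem.List.pyRange_one, List.map_map]
    simp
  simp only [maximumBinaryString, maximumBinaryString_alt, ← hl]
  have hB := pvB_neg l 0
  rw [Nat.cast_zero] at hB
  rw [h1, h2, pvLoop1_zero,
    show (l.map pvNorm, (-1 : Int)) = (List.replicate 0 '1' ++ l.map pvNorm, (-1 : Int)) by simp,
    hB]
  by_cases hm : '0' ∈ l
  · have hc0 : l.count '0' ≠ 0 := by simpa [List.count_eq_zero] using hm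
    have hle := pvIdx_count_le l hm
    have hidx : l.idxOf '0' < l.length := List.idxOf_lt_length_of_mem hm
    have hpos : l.idxOf '0' + l.count '0' - 1 < l.length := by omega
    rw [if_pos hm, if_pos hm, hA]
    have hcast : ∀ k : Nat, ((k : Int) = ((l.count '0' : Int), (0 : Int) + l.idxOf '0').1 + ((l.count '0' : Int), (0 : Int) + l.idxOf '0').2 - 1)
        = ((k : Int) = ((l.idxOf '0' + l.count '0' - 1 : Nat) : Int)) := by
      intro k
      have : ((l.idxOf '0' + l.count '0' - 1 : Nat) : Int)
          = ((l.count '0' : Int), (0 : Int) + l.idxOf '0').1 + ((l.count '0' : Int), (0 : Int) + l.idxOf '0').2 - 1 := by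
        push_cast [Nat.cast_sub (by omega : 1 ≤ l.idxOf '0' + l.count '0')]; ring
      rw [this]
    simp only [hcast]
    rw [pvMap_range _ _ hpos,
      show (0 + List.idxOf '0' l + (List.count '0' l - 1)) = List.idxOf '0' l + List.count '0' l - 1 by omega,
      show l.length - List.idxOf '0' l - List.count '0' l
        = l.length - (List.idxOf '0' l + List.count '0' l - 1) - 1 by omega]
  · have hc0 : l.count '0' = 0 := List.count_eq_zero.mpr hm
    rw [if_neg hm, if_neg hm, hA]
    rw [List.map_congr_left (g := fun _ => '1') (by intro k _; simp)]
    simp [List.map_const']
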